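-- pv_equiv track=rewrite | github.com/praveenv253/carnatic-notation | latex_renderer.py | parse_early_ending
-- ===== SOURCE A (Python) =====
-- def parse_early_ending(text, config):
--     if not text.endswith(r'\\'):
--         return text, config, 0
--
--     pattern = config['pattern']
--     chunks = text.split()[:-1]  # Remove the trailing '\\'
--     num_chunks = len(chunks)
--
--     # Count out all the aksharas used up so far, then count out the number of
--     # remaining aksharas in the current line of the taalam pattern
--     total_aksh = pattern.count(',')
--     if num_chunks >= total_aksh:
--         raise ValueError('Bad early ending!')
--     start = 0
--     for _ in range(num_chunks):
--         start = pattern.index(',', start) + 1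
--     # `start` now contains the first index after `num_chunks` commas
--     # Next, find the number of remaining commas (i.e., aksharas) until first
--     # occurrence of '+' or until the end of the pattern
--     try:
--         stop = pattern.index('+', start)
--     except ValueError:
--         stop = len(pattern)
--     num_aksh_to_fill = pattern[start:stop].count(',')
--
--     # Extend the current line
--     chunks.extend(['_',] * num_aksh_to_fill)
--
--     # Update the taalam pattern to truncate it until the end of the current line
--     reduced_pattern = pattern[:stop]
--     # If there are any table separators after the last printed akshara, don't
--     # render them
--     reduced_pattern = (reduced_pattern[:start]
--                        + reduced_pattern[start:].replace('||', '*').replace('|', '*'))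
--
--     updated_config = config.copy()
--     updated_config['pattern'] = reduced_pattern
--
--     return ' '.join(chunks), updated_config, num_aksh_to_fill
-- ===== SOURCE B (Python) =====
-- def parse_early_ending(text, config):
--     if not text.endswith(r'\\'):
--         return text, config, 0
--
--     pattern = config['pattern']
--     chunks = text.split()[:-1]
--     n = len(chunks)
--     if n >= pattern.count(','):
--         raise ValueError('Bad early ending!')
--
--     # Single fused left-to-right scan over the pattern: first copy characters
--     # verbatim until n commas have gone by, then (until the first '+' or the
--     # end) rewrite '||' and '|' to '*' while counting the remaining commas.
--     out = []
--     fill = 0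
--     k = n            # commas still to pass before the current line starts
--     i = 0
--     m = len(pattern)
--     while i < m:
--         c = pattern[i]
--         if k > 0:
--             out.append(c)
--             if c == ',':
--                 k -= 1
--             i += 1
--         elif c == '+':
--             break
--         elif c == '|':
--             out.append('*')
--             i += 2 if pattern[i:i + 2] == '||' else 1
--         else:
--             if c == ',':
--                 fill += 1
--             out.append(c)
--             i += 1
--
--     updated_config = dict(config)
--     updated_config['pattern'] = ''.join(out)
--     return ' '.join(chunks + ['_'] * fill), updated_config, fill
-- ===== Notes on version B (the rewrite author's own statement) =====
-- stated objective: alternative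
-- what changed: A makes six staged passes over the pattern (count(','), a repeated index(',') loop, a try/except index('+'), a slice count, two slices and two replace passes); B makes ONE fused left-to-right state-machine scan that copies the first n akshara chunks, then rewrites '||'/'|' to '*' and counts the remaining commas until the first '+', emitting the new pattern and the fill count together.
import Mathlib
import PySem

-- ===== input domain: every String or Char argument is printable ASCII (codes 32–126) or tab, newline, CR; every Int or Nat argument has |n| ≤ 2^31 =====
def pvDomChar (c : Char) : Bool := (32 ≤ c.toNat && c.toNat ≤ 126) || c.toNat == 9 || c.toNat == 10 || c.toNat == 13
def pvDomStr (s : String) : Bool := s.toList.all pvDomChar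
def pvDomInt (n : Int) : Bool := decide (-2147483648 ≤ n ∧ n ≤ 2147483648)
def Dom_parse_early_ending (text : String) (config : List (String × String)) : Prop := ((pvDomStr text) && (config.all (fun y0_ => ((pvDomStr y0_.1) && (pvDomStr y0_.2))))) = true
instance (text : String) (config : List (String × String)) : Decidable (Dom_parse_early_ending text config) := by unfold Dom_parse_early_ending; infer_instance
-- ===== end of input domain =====

-- B replaces A's staged passes over the pattern (comma-chasing index loop, '+' search,
-- slice count, slicing, two replace passes) by ONE fused left-to-right state-machine scan
-- that emits the rewritten pattern and the fill count together (objective: alternative).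

-- ===== PORT A =====
def parse_early_ending (text : String) (config : List (String × String)) : String × (List (String × String)) × Int :=
  if ¬ (PySem.Str.endswith text "\\\\") then (text, config, 0)
  else
    match (PySem.Dict.get? (PySem.Dict.mk config) "pattern" : Option String) with
    | none => (text, config, 0)   -- Python raises KeyError here; excluded by Pre_
    | some pattern =>
      let pat := pattern.toList
      let chunks := PySem.List.slice (PySem.Str.split₀ text) none (some (-1))
      let num_chunks := chunks.length
      let total_aksh := PySem.Chars.count pat [',']
      if num_chunks ≥ total_aksh then (text, config, 0)   -- Python raises ValueError; excluded by Pre_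
      else
        -- pattern.index(',', start): inside Pre_ a comma is always found, so findFrom is exact
        let start := (PySem.List.pyRange 0 (num_chunks : Int)).foldl
          (fun st _ => PySem.Chars.findFrom pat [','] st + 1) 0
        -- try: stop = pattern.index('+', start) / except ValueError: stop = len(pattern)
        let f := PySem.Chars.findFrom pat ['+'] start
        let stop : Int := if f = -1 then (pat.length : Int) else f
        let num_aksh_to_fill := PySem.Chars.count (PySem.List.slice pat (some start) (some stop)) [',']
        let chunks := chunks ++ List.replicate num_aksh_to_fill "_"
        let reduced := PySem.List.slice pat none (some stop)
        let reduced := PySem.List.slice reduced none (some start) ++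
          PySem.Chars.replace (PySem.Chars.replace (PySem.List.slice reduced (some start) none)
            ['|','|'] ['*']) ['|'] ['*']
        (PySem.Str.join " " chunks, (PySem.Dict.insert (PySem.Dict.mk config) "pattern" (String.ofList reduced)).items,
         (num_aksh_to_fill : Int))

-- ===== PORT B =====
-- The fused scan of Source B: while k commas are still to pass, copy characters; then,
-- until '+' or the end, rewrite '||' and '|' to '*' and count the remaining commas.
def pvAltGo : List Char → Nat → List Char × Nat
  | [], _ => ([], 0)
  | c :: rest, k =>
    if 0 < k then
      let r := pvAltGo rest (if c = ',' then k - 1 else k)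
      (c :: r.1, r.2)
    else if c = '+' then ([], 0)
    else if c = '|' then
      if rest.head? = some '|' then
        let r := pvAltGo (rest.drop 1) 0; ('*' :: r.1, r.2)
      else
        let r := pvAltGo rest 0; ('*' :: r.1, r.2)
    else
      let r := pvAltGo rest 0
      (c :: r.1, if c = ',' then r.2 + 1 else r.2)
termination_by cs _ => cs.length
decreasing_by all_goals (simp only [List.length_cons, List.length_drop]; omega)

def parse_early_ending_alt (text : String) (config : List (String × String)) : String × (List (String × String)) × Int :=
  if ¬ (PySem.Str.endswith text "\\\\") then (text, config, 0)
  else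
    match (PySem.Dict.get? (PySem.Dict.mk config) "pattern" : Option String) with
    | none => (text, config, 0)   -- Python raises KeyError here; excluded by Pre_
    | some pattern =>
      let pat := pattern.toList
      let chunks := PySem.List.slice (PySem.Str.split₀ text) none (some (-1))
      let n := chunks.length
      if n ≥ PySem.Chars.count pat [','] then (text, config, 0)   -- Python raises ValueError; excluded by Pre_
      else
        let r := pvAltGo pat n
        (PySem.Str.join " " (chunks ++ List.replicate r.2 "_"),
         (PySem.Dict.insert (PySem.Dict.mk config) "pattern" (String.ofList r.1)).items,
         (r.2 : Int))

-- ===== PRECONDITION & SPEC =====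
-- Pre_ excludes exactly the inputs on which the Python A raises: a text ending in '\\' whose
-- config lacks the 'pattern' key (KeyError; getD then yields "" with zero commas) or whose
-- chunk count reaches the pattern's comma count (ValueError 'Bad early ending!').
def Pre_parse_early_ending (text : String) (config : List (String × String)) : Prop :=
  PySem.Str.endswith text "\\\\" = true →
    (PySem.List.slice (PySem.Str.split₀ text) none (some (-1))).length
      < PySem.Chars.count (PySem.Dict.getD (PySem.Dict.mk config) "pattern" "").toList [',']

instance (text : String) (config : List (String × String)) : Decidable (Pre_parse_early_ending text config) := by unfold Pre_parse_early_ending; infer_instance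

def pvWitness_parse_early_ending : String × (List (String × String)) := ("a \\\\", [("pattern", ", , | +")])

def Spec_parse_early_ending (text : String) (config : List (String × String)) (out : String × (List (String × String)) × Int) : Prop := out = parse_early_ending_alt text config
instance (text : String) (config : List (String × String)) (out : String × (List (String × String)) × Int) : Decidable (Spec_parse_early_ending text config out) := by unfold Spec_parse_early_ending; infer_instance

-- ===== CLAIM (what is proved, stated in full; the proofs are below) =====
def Claim_equal_parse_early_ending : Prop := ∀ (text : String) (config : List (String × String)), Dom_parse_early_ending text config → Pre_parse_early_ending text config → Spec_parse_early_ending text config (parse_early_ending text config)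

-- ===== LEMMAS AND PROOFS =====

-- Chars.count on a single character is List.count.
lemma pv_count_go (c : Char) : ∀ (fuel : ℕ) (l : List Char) (acc : ℕ), l.length ≤ fuel →
    PySem.Chars.count.go [c] fuel l acc = acc + l.count c := by
  intro fuel
  induction fuel with
  | zero =>
    intro l acc hl
    have : l = [] := List.eq_nil_of_length_eq_zero (Nat.le_zero.mp hl)
    subst this; simp [PySem.Chars.count.go]
  | succ fuel ih =>
    intro l acc hl
    cases l with
    | nil => simp [PySem.Chars.count.go]
    | cons h t =>
      have hstep : PySem.Chars.count.go [c] (fuel+1) (h::t) acc =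
          if [c].isPrefixOf (h::t) then PySem.Chars.count.go [c] fuel (List.drop 1 (h::t)) (acc+1)
          else PySem.Chars.count.go [c] fuel t acc := by
        simp [PySem.Chars.count.go]
      rw [hstep]
      have hlen : t.length ≤ fuel := by simpa using hl
      have hpre : [c].isPrefixOf (h::t) = (c == h) := by
        simp [List.isPrefixOf]
      rw [hpre]
      by_cases hch : c = h
      · subst hch
        simp only [beq_self_eq_true, if_true, List.drop_succ_cons, List.drop_zero]
        rw [ih t (acc+1) hlen, List.count_cons]
        simp only [beq_self_eq_true, if_true]
        omega
      · have hch2 : (c == h) = false := by simp [hch]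
        simp only [hch2, Bool.false_eq_true, if_false]
        rw [ih t acc hlen, List.count_cons]
        have : (h == c) = false := by simp [Ne.symm hch]
        simp [this]

lemma pv_count_singleton (cs : List Char) (c : Char) : PySem.Chars.count cs [c] = cs.count c := by
  have : PySem.Chars.count cs [c] = PySem.Chars.count.go [c] cs.length cs 0 := by
    simp [PySem.Chars.count]
  rw [this, pv_count_go c cs.length cs 0 (le_refl _)]
  omega

lemma pv_singleton_prefix (c : Char) (l : List Char) : [c] <+: l ↔ l.head? = some c := by
  constructor
  · rintro ⟨t, rfl⟩; rfl
  · intro h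
    cases l with
    | nil => cases h
    | cons x t => exact ⟨t, by simpa using congrArg (fun o => o.getD c) h.symm⟩

-- idxOf is minimal among indices holding c
lemma pv_idxOf_le (c : Char) : ∀ (l : List Char) (j : Nat) (hj : j < l.length), l[j] = c → l.idxOf c ≤ j := by
  intro l
  induction l with
  | nil => intro j hj; simp at hj
  | cons x t ih =>
    intro j hj hc
    by_cases hx : x = c
    · subst hx; simp [List.idxOf_cons_self]
    · cases j with
      | zero => simp at hc; exact absurd hc hx
      | succ j =>
        rw [List.idxOf_cons_ne _ (by simpa using hx)]
        have := ih j (by simpa using hj) (by simpa using hc)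
        omega

-- Chars.find of a single character is idxOf (or -1 when absent).
lemma pv_find_idx (l : List Char) (c : Char) :
    PySem.Chars.find l [c] = if c ∈ l then ((l.idxOf c : Nat) : Int) else -1 := by
  by_cases hm : c ∈ l
  · rw [if_pos hm]
    obtain ⟨pre, suf, rfl⟩ : ∃ pre suf, l = pre ++ c :: suf := by
      obtain ⟨pre, suf, h⟩ := List.append_of_mem hm; exact ⟨pre, suf, h⟩
    have hinf : [c] <:+: pre ++ c :: suf := ⟨pre, suf, by simp⟩
    have h0 : 0 ≤ PySem.Chars.find (pre ++ c :: suf) [c] :=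
      (PySem.Chars.find_nonneg_iff _ _).mpr hinf
    obtain ⟨hpre, hmin⟩ := PySem.Chars.find_spec h0
    set l := pre ++ c :: suf
    set j := (PySem.Chars.find l [c]).toNat with hj
    have hhead : l[j]? = some c := by
      rw [← List.head?_drop]; exact ((pv_singleton_prefix c _).mp hpre)
    have hjlt : j < l.length := by
      by_contra hc
      rw [List.getElem?_eq_none (by omega)] at hhead; cases hhead
    have hje : l[j] = c := by
      have := List.getElem?_eq_getElem hjlt
      rw [this] at hhead; exact Option.some.inj hhead
    have h1 : l.idxOf c ≤ j := pv_idxOf_le c l j hjlt hje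
    have h2 : ¬ (l.idxOf c < j) := by
      intro hlt
      apply hmin _ hlt
      rw [pv_singleton_prefix, List.head?_drop]
      have hilt : l.idxOf c < l.length := List.idxOf_lt_length_of_mem hm
      rw [List.getElem?_eq_getElem hilt, List.getElem_idxOf hilt]
    have : l.idxOf c = j := by omega
    omega
  · rw [if_neg hm]
    apply (PySem.Chars.find_eq_neg_one_iff _ _).mpr
    intro hinf
    exact hm (hinf.subset (by simp))

-- Chars.replace with a non-empty needle as a plain structural recursion.
def pvRep (old new : List Char) : List Char → List Char
  | [] => []
  | c :: t =>
    if old.isPrefixOf (c :: t) then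
      if _h : 0 < old.length then new ++ pvRep old new (List.drop old.length (c :: t))
      else c :: pvRep old new t
    else c :: pvRep old new t
termination_by l => l.length
decreasing_by all_goals (simp only [List.length_cons, List.length_drop]; omega)

lemma pv_rep_go (old new : List Char) (hold : old ≠ []) : ∀ (fuel : Nat) (l acc : List Char),
    l.length ≤ fuel → PySem.Chars.replace.go old new fuel l acc = acc.reverse ++ pvRep old new l := by
  have holdlen : 0 < old.length := List.length_pos_of_ne_nil hold
  intro fuel
  induction fuel with
  | zero =>
    intro l acc hl
    have : l = [] := List.eq_nil_of_length_eq_zero (Nat.le_zero.mp hl)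
    subst this
    simp [PySem.Chars.replace.go, pvRep]
  | succ fuel ih =>
    intro l acc hl
    cases l with
    | nil => simp [PySem.Chars.replace.go, pvRep]
    | cons c t =>
      have hstep : PySem.Chars.replace.go old new (fuel+1) (c::t) acc =
          if old.isPrefixOf (c::t) then
            PySem.Chars.replace.go old new fuel (List.drop old.length (c::t)) (new.reverse ++ acc)
          else PySem.Chars.replace.go old new fuel t (c :: acc) := by
        simp [PySem.Chars.replace.go]
      rw [hstep]
      by_cases hpre : old.isPrefixOf (c::t)
      · rw [if_pos hpre, ih _ _ (by simp only [List.length_drop, List.length_cons] at *; omega)]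
        rw [pvRep, if_pos hpre, dif_pos holdlen]
        simp
      · rw [if_neg hpre, ih _ _ (by simpa using hl)]
        rw [pvRep, if_neg hpre]
        simp

lemma pv_replace_eq (old new : List Char) (hold : old ≠ []) (l : List Char) :
    PySem.Chars.replace l old new = pvRep old new l := by
  rw [PySem.Chars.replace]
  rw [if_neg (by simpa using hold)]
  exact pv_rep_go old new hold l.length l [] (le_refl _)

-- the fused '||'/'|' → '*' rewrite, as A stages it
def pvRep2 (u : List Char) : List Char := pvRep ['|'] ['*'] (pvRep ['|','|'] ['*'] u)

lemma pvRep2_nil : pvRep2 [] = [] := by simp [pvRep2, pvRep]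

lemma pvRep_outer_skip (c : Char) (u : List Char) (hc : c ≠ '|') :
    pvRep ['|'] ['*'] (c :: u) = c :: pvRep ['|'] ['*'] u := by
  rw [pvRep]
  rw [if_neg (by simp [List.isPrefixOf]; exact fun h => absurd h.symm hc)]

lemma pvRep2_bar2 (r : List Char) : pvRep2 ('|' :: '|' :: r) = '*' :: pvRep2 r := by
  unfold pvRep2
  rw [pvRep]
  rw [if_pos (by simp [List.isPrefixOf])]
  rw [dif_pos (by simp)]
  simp only [List.length_cons, List.length_nil, List.drop_succ_cons, List.drop_zero, List.singleton_append]
  rw [pvRep_outer_skip '*' _ (by decide)]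

lemma pvRep2_bar1 (r : List Char) (hr : r = [] ∨ r.head? ≠ some '|') :
    pvRep2 ('|' :: r) = '*' :: pvRep2 r := by
  unfold pvRep2
  have hnot2 : List.isPrefixOf ['|','|'] ('|' :: r) = false := by
    rcases hr with rfl | hr
    · decide
    · cases r with
      | nil => decide
      | cons x u =>
        have hx : x ≠ '|' := by simpa using hr
        simp [List.isPrefixOf]
        exact Ne.symm hx
  rw [pvRep]
  rw [if_neg (by simp [hnot2])]
  rw [pvRep]
  rw [if_pos (by simp [List.isPrefixOf])]
  rw [dif_pos (by simp)]
  simp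

lemma pvRep2_other (c : Char) (r : List Char) (hc : c ≠ '|') :
    pvRep2 (c :: r) = c :: pvRep2 r := by
  unfold pvRep2
  rw [pvRep]
  rw [if_neg (by simp [List.isPrefixOf]; exact fun h => absurd h.symm hc)]
  rw [pvRep_outer_skip c _ hc]

-- index of the first '+' (or the length): where A's `stop` cuts, relative to the suffix
def pvStop (t : List Char) : Nat := if '+' ∈ t then t.idxOf '+' else t.length

-- how far the n-comma prefix phase reaches, charwise
def pvSkip : List Char → Nat → Nat
  | _, 0 => 0
  | [], _+1 => 0
  | c :: rest, k+1 => 1 + pvSkip rest (if c = ',' then k else k + 1)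

lemma pvSkip_le (cs : List Char) : ∀ k, pvSkip cs k ≤ cs.length := by
  induction cs with
  | nil => intro k; cases k <;> simp [pvSkip]
  | cons c rest ih =>
    intro k
    cases k with
    | zero => simp [pvSkip]
    | succ k =>
      simp only [pvSkip, List.length_cons]
      have := ih (if c = ',' then k else k + 1)
      omega

lemma pvSkip_jump : ∀ (t : List Char) (k : Nat), ',' ∈ t →
    pvSkip t (k+1) = t.idxOf ',' + 1 + pvSkip (t.drop (t.idxOf ',' + 1)) k := by
  intro t
  induction t with
  | nil => intro k hm; cases hm
  | cons x r ih =>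
    intro k hm
    by_cases hx : x = ','
    · subst hx
      simp [pvSkip, List.idxOf_cons_self]
    · have hm' : ',' ∈ r := by
        rcases List.mem_cons.mp hm with h | h
        · exact absurd h.symm hx
        · exact h
      rw [List.idxOf_cons_ne _ (by simpa using hx)]
      simp only [pvSkip, if_neg hx]
      rw [ih k hm']
      have hd : (x :: r).drop (r.idxOf ',' + 1 + 1) = r.drop (r.idxOf ',' + 1) := by
        simp [List.drop_succ_cons]
      rw [hd]
      omega

lemma pv_count_drop_idxOf (c : Char) : ∀ (t : List Char), c ∈ t →
    (t.drop (t.idxOf c + 1)).count c = t.count c - 1 := by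
  intro t
  induction t with
  | nil => intro hm; cases hm
  | cons x r ih =>
    intro hm
    by_cases hx : x = c
    · subst hx
      simp [List.idxOf_cons_self]
    · have hm' : c ∈ r := by
        rcases List.mem_cons.mp hm with h | h
        · exact absurd h.symm hx
        · exact h
      rw [List.idxOf_cons_ne _ (by simpa using hx)]
      have hd : (x :: r).drop (r.idxOf c + 1 + 1) = r.drop (r.idxOf c + 1) := by
        simp [List.drop_succ_cons]
      rw [hd, ih hm', List.count_cons]
      have : (x == c) = false := by simp [hx]
      simp [this]

-- A's comma-chasing loop is `pvSkip`
lemma pv_iterA (cs : List Char) : ∀ (k : Nat) (s : Nat), k ≤ (cs.drop s).count ',' →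
    (fun st => PySem.Chars.findFrom cs [','] st + 1)^[k] (s : Int) = ((s + pvSkip (cs.drop s) k : Nat) : Int) := by
  intro k
  induction k with
  | zero =>
    intro s _
    have : pvSkip (cs.drop s) 0 = 0 := by cases cs.drop s <;> rfl
    simp [this]
  | succ k ih =>
    intro s hk
    have hsle : s ≤ cs.length := by
      by_contra hc
      rw [List.drop_eq_nil_of_le (by omega)] at hk
      simp at hk
    have hm : ',' ∈ cs.drop s := List.count_pos_iff.mp (by omega)
    set t := cs.drop s with ht
    set j := t.idxOf ',' with hjdef
    have hjlt : j < t.length := List.idxOf_lt_length_of_mem hm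
    rw [Function.iterate_succ_apply]
    have hstep : PySem.Chars.findFrom cs [','] (s : Int) + 1 = ((s + j + 1 : Nat) : Int) := by
      rw [PySem.Chars.findFrom_natCast cs [','] s hsle, ← ht, pv_find_idx t ',', if_pos hm, ← hjdef]
      rw [if_neg (by simp)]
      push_cast; ring
    rw [hstep]
    have hdd : cs.drop (s + j + 1) = t.drop (j + 1) := by
      rw [ht, List.drop_drop]; ring_nf
    have hk' : k ≤ (cs.drop (s + j + 1)).count ',' := by
      rw [hdd, pv_count_drop_idxOf ',' t hm]
      omega
    rw [ih (s + j + 1) hk', hdd, pvSkip_jump t k hm, ← hjdef]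
    congr 1
    omega

lemma pv_foldl_const (g : Int → Int) : ∀ (l : List Int) (a : Int),
    l.foldl (fun st _ => g st) a = g^[l.length] a := by
  intro l
  induction l with
  | nil => intro a; simp
  | cons x t ih => intro a; simpa [Function.iterate_succ_apply] using ih (g a)

lemma pv_foldl_iterate (g : Int → Int) (k : Nat) (a : Int) :
    (PySem.List.pyRange 0 (k : Int)).foldl (fun st _ => g st) a = g^[k] a := by
  rw [pv_foldl_const, PySem.List.length_pyRange_one]
  simp

-- B's head phase: the scan copies exactly the first `pvSkip cs k` characters
lemma pv_altGo_head : ∀ (cs : List Char) (k : Nat), k ≤ cs.count ',' →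
    pvAltGo cs k = (cs.take (pvSkip cs k) ++ (pvAltGo (cs.drop (pvSkip cs k)) 0).1,
                    (pvAltGo (cs.drop (pvSkip cs k)) 0).2) := by
  intro cs
  induction cs with
  | nil =>
    intro k hk
    have hk0 : k = 0 := by simpa using hk
    subst hk0
    simp [pvSkip]
  | cons c rest ih =>
    intro k hk
    cases k with
    | zero =>
      show pvAltGo (c :: rest) 0 = _
      simp [pvSkip]
    | succ k =>
      have hk' : (if c = ',' then k else k + 1) ≤ rest.count ',' := by
        rw [List.count_cons] at hk
        by_cases hc : c = ','
        · simp only [if_pos hc]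
          simp [hc] at hk
          omega
        · simp only [if_neg hc]
          have : (c == ',') = false := by simp [hc]
          simp [this] at hk
          omega
      have hunfold : pvAltGo (c :: rest) (k+1) =
          ((c :: (pvAltGo rest (if c = ',' then k else k + 1)).1),
           (pvAltGo rest (if c = ',' then k else k + 1)).2) := by
        simp only [pvAltGo]
        rw [if_pos (Nat.succ_pos k)]
        by_cases hc : c = ',' <;> simp [hc]
      have hsk : pvSkip (c :: rest) (k+1) = pvSkip rest (if c = ',' then k else k + 1) + 1 := by
        simp only [pvSkip]; omega
      rw [hunfold, ih _ hk', hsk, List.take_succ_cons, List.drop_succ_cons]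
      simp

lemma pvStop_nil : pvStop [] = 0 := by simp [pvStop]

lemma pvStop_plus (u : List Char) : pvStop ('+'::u) = 0 := by
  simp [pvStop, List.idxOf_cons_self]

lemma pvStop_cons (c : Char) (u : List Char) (hc : c ≠ '+') : pvStop (c::u) = pvStop u + 1 := by
  by_cases hm : '+' ∈ u
  · have hmc : '+' ∈ c :: u := List.mem_cons_of_mem _ hm
    rw [pvStop, pvStop, if_pos hmc, if_pos hm, List.idxOf_cons_ne _ (by simpa using hc)]
  · have hmc : '+' ∉ c :: u := by
      intro h
      rcases List.mem_cons.mp h with h | h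
      · exact hc h.symm
      · exact hm h
    rw [pvStop, pvStop, if_neg hmc, if_neg hm, List.length_cons]

-- B's tail phase matches A's staged cut + two replaces + slice-count
lemma pv_altGo_tail (t : List Char) :
    pvAltGo t 0 = (pvRep2 (t.take (pvStop t)), (t.take (pvStop t)).count ',') := by
  have H : ∀ (m : Nat) (t : List Char), t.length ≤ m →
      pvAltGo t 0 = (pvRep2 (t.take (pvStop t)), (t.take (pvStop t)).count ',') := by
    intro m
    induction m with
    | zero =>
      intro t ht
      have : t = [] := List.eq_nil_of_length_eq_zero (Nat.le_zero.mp ht)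
      subst this
      simp [pvAltGo, pvStop_nil, pvRep2_nil]
    | succ m ih =>
      intro t ht
      cases t with
      | nil => simp [pvAltGo, pvStop_nil, pvRep2_nil]
      | cons c rest =>
        by_cases hplus : c = '+'
        · subst hplus
          have : pvAltGo ('+' :: rest) 0 = ([], 0) := by
            simp [pvAltGo]
          rw [this, pvStop_plus]
          simp [pvRep2_nil]
        · rw [pvStop_cons c rest hplus, List.take_succ_cons]
          by_cases hbar : c = '|'
          · subst hbar
            cases hh : rest.head? with
            | some x =>
              by_cases hx : x = '|'
              · subst hx
                obtain ⟨rest2, rfl⟩ : ∃ rest2, rest = '|' :: rest2 := by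
                  cases rest with
                  | nil => cases hh
                  | cons y u => exact ⟨u, by simpa using congrArg (List.cons · u) (Option.some.inj hh)⟩
                have hun : pvAltGo ('|' :: '|' :: rest2) 0 =
                    ('*' :: (pvAltGo rest2 0).1, (pvAltGo rest2 0).2) := by
                  simp [pvAltGo]
                rw [hun, ih rest2 (by simp at ht; omega)]
                rw [pvStop_cons '|' rest2 (by decide), List.take_succ_cons, pvRep2_bar2]
                simp
              · have hun : pvAltGo ('|' :: rest) 0 =
                    ('*' :: (pvAltGo rest 0).1, (pvAltGo rest 0).2) := by
                  simp [pvAltGo, hh, hx]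
                rw [hun, ih rest (by simp at ht; omega)]
                rw [pvRep2_bar1]
                · simp
                · right
                  cases hstop : pvStop rest with
                  | zero => simp
                  | succ n =>
                    cases rest with
                    | nil => simp at hh
                    | cons y u =>
                      rw [List.take_succ_cons, List.head?_cons]
                      simpa using fun h => hx (by rw [← h]; exact (Option.some.inj hh).symm)
            | none =>
              have hrest : rest = [] := by cases rest with | nil => rfl | cons y u => cases hh
              subst hrest
              have hun : pvAltGo ['|'] 0 = (['*'], 0) := by simp [pvAltGo]
              rw [hun]
              simp [pvStop_nil, pvRep2_bar1 [] (Or.inl rfl), pvRep2_nil]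
          · have hun : pvAltGo (c :: rest) 0 =
                (c :: (pvAltGo rest 0).1,
                 if c = ',' then (pvAltGo rest 0).2 + 1 else (pvAltGo rest 0).2) := by
              simp only [pvAltGo]
              rw [if_neg (by omega), if_neg hplus, if_neg hbar]
            rw [hun, ih rest (by simp at ht; omega), pvRep2_other c _ hbar]
            by_cases hc : c = ','
            · simp [hc]
            · simp [hc]
  exact H t.length t (le_refl _)

-- ===== VERDICT (by name: the statement is the Claim_ definition above) =====
set_option maxHeartbeats 1000000 in
theorem parse_early_ending_spec : Claim_equal_parse_early_ending := by
  unfold Claim_equal_parse_early_ending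
  intro text config _ hpre
  unfold Pre_parse_early_ending at hpre
  unfold Spec_parse_early_ending parse_early_ending parse_early_ending_alt
  by_cases he : PySem.Str.endswith text "\\\\" = true
  case neg => rw [if_pos he, if_pos he]
  case pos =>
  specialize hpre he
  simp only [he, not_true_eq_false, if_false]
  cases hg : PySem.Dict.get? (PySem.Dict.mk config) "pattern" with
  | none =>
    exfalso
    have hgd : PySem.Dict.getD (PySem.Dict.mk config) "pattern" "" = "" := by
      simp [PySem.Dict.getD, hg]
    rw [hgd] at hpre
    have h0 : ("" : String).toList = [] := by simp
    rw [h0, pv_count_singleton] at hpre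
    simp at hpre
  | some pattern =>
    simp only []
    have hgd : PySem.Dict.getD (PySem.Dict.mk config) "pattern" "" = pattern := by
      simp [PySem.Dict.getD, hg]
    rw [hgd] at hpre
    set pat := pattern.toList with hpat
    set n := (PySem.List.slice (PySem.Str.split₀ text) none (some (-1))).length with hn0
    have hcnt : PySem.Chars.count pat [','] = pat.count ',' := pv_count_singleton pat ','
    have hn : n < pat.count ',' := by rw [← hcnt]; exact hpre
    have hguard : ¬ (n ≥ PySem.Chars.count pat [',']) := by omega
    rw [if_neg hguard, if_neg hguard]
    -- A's start loop computes pvSkip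
    set sN := pvSkip pat n with hsN
    have hstart : (PySem.List.pyRange 0 (n : Int)).foldl
        (fun st _ => PySem.Chars.findFrom pat [','] st + 1) 0 = ((sN : Nat) : Int) := by
      rw [pv_foldl_iterate]
      have := pv_iterA pat n 0 (by simpa using le_of_lt hn)
      simpa using this
    rw [hstart]
    have hsle : sN ≤ pat.length := pvSkip_le pat n
    set t := pat.drop sN with htdef
    set stN := sN + pvStop t with hstN
    -- A's stop is sN + pvStop t
    have hstop : (if PySem.Chars.findFrom pat ['+'] ((sN : Nat) : Int) = -1
        then ((pat.length : Nat) : Int) else PySem.Chars.findFrom pat ['+'] ((sN : Nat) : Int))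
        = ((stN : Nat) : Int) := by
      rw [PySem.Chars.findFrom_natCast pat ['+'] sN hsle, ← htdef, pv_find_idx t '+']
      by_cases hm : '+' ∈ t
      · rw [if_pos hm]
        have h1 : ¬ (((t.idxOf '+' : Nat) : Int) = -1) := by simp
        have h2 : ¬ (((sN : Nat) : Int) + ((t.idxOf '+' : Nat) : Int) = -1) := by omega
        rw [if_neg h1, if_neg h2]
        rw [hstN, pvStop, if_pos hm]
        push_cast; ring
      · rw [if_neg hm]
        rw [if_pos rfl, if_pos rfl]
        rw [hstN, pvStop, if_neg hm, htdef, List.length_drop]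
        omega
    rw [hstop]
    have hsst : sN ≤ stN := by rw [hstN]; exact Nat.le_add_right _ _
    -- slices
    have hsliceAB : PySem.List.slice pat (some ((sN : Nat) : Int)) (some ((stN : Nat) : Int))
        = t.take (pvStop t) := by
      rw [PySem.List.slice_natCast, ← htdef, show stN - sN = pvStop t from by omega]
    have hfill : PySem.Chars.count (PySem.List.slice pat (some ((sN : Nat) : Int)) (some ((stN : Nat) : Int))) [',']
        = (t.take (pvStop t)).count ',' := by
      rw [hsliceAB, pv_count_singleton]
    rw [hfill]
    have hred : PySem.List.slice pat none (some ((stN : Nat) : Int)) = pat.take stN :=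
      PySem.List.slice_to_natCast pat stN
    rw [hred]
    have hhead : PySem.List.slice (pat.take stN) none (some ((sN : Nat) : Int)) = pat.take sN := by
      rw [PySem.List.slice_to_natCast, List.take_take, Nat.min_eq_left hsst]
    have htail : PySem.List.slice (pat.take stN) (some ((sN : Nat) : Int)) none = t.take (pvStop t) := by
      rw [PySem.List.slice_from_natCast, List.drop_take, ← htdef, show stN - sN = pvStop t from by omega]
    rw [hhead, htail]
    -- the two replaces are pvRep2
    have hreps : PySem.Chars.replace (PySem.Chars.replace (t.take (pvStop t)) ['|','|'] ['*']) ['|'] ['*']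
        = pvRep2 (t.take (pvStop t)) := by
      rw [pv_replace_eq _ _ (by simp) _, pv_replace_eq _ _ (by simp) _, pvRep2]
    rw [hreps]
    -- B's fused scan, split into head and tail phases
    have hB : pvAltGo pat n = (pat.take sN ++ pvRep2 (t.take (pvStop t)), (t.take (pvStop t)).count ',') := by
      rw [pv_altGo_head pat n (le_of_lt hn), ← hsN, ← htdef, pv_altGo_tail t]
    rw [hB]
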